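-- pv_equiv track=rewrite | github.com/dcthomson/Advent-of-Code | 2019/17 - Set and Forget/part2.py | getascii
-- ===== SOURCE A (Python) =====
-- def getascii(s):
--     retarr = []
--     commands = s.split(",")
--     for i in commands:
--         if len(retarr):
--             retarr.append(44)
--         for c in i:
--             retarr.append(ord(c))
--     retarr.append(10)
--     return retarr
-- ===== SOURCE B (Python) =====
-- def getascii(s):
--     return [ord(c) for c in s.lstrip(',')] + [10]
-- ===== Notes on version B (the rewrite author's own statement) =====
-- stated objective: simpler
-- what changed: Replaces split-on-comma plus nested group loop with conditional 44 separators by a single lstrip(',') followed by a direct per-character ord map (valid because the separator 44 is ord(',') and only leading empty groups suppress it).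
import Mathlib
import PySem

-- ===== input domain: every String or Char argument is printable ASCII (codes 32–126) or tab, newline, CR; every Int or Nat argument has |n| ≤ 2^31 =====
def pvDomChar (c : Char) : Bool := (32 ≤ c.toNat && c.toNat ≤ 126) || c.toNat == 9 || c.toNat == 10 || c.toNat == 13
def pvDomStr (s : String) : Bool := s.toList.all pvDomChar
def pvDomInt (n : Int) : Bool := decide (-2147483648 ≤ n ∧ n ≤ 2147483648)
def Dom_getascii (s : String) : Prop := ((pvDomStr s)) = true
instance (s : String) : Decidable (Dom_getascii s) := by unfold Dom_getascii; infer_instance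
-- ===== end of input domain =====

-- B strips leading commas then maps ord directly; equivalence is proved for the return value only.

-- ===== PORT A =====
-- A: split on ",", then for each group emit a 44 separator (only once retarr is nonempty)
-- followed by the ord of every character of the group, and finally append 10.
def getascii (s : String) : List Int :=
  (PySem.Chars.splitOn s.toList [',']).foldl
    (fun retarr i =>
      i.foldl (fun r c => r ++ [(c.toNat : Int)])
        (if retarr.length ≠ 0 then retarr ++ [44] else retarr)) []
  ++ [10]

-- ===== PORT B =====
-- B: drop leading ',' characters (s.lstrip(',')), map ord over the rest, append 10.
def getascii_alt (s : String) : List Int :=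
  ((s.toList.dropWhile (fun c => c == ',')).map (fun c => (c.toNat : Int))) ++ [10]

-- ===== PRECONDITION & SPEC =====
def Spec_getascii (s : String) (out : List Int) : Prop := out = getascii_alt s
instance (s : String) (out : List Int) : Decidable (Spec_getascii s out) := by unfold Spec_getascii; infer_instance

-- ===== CLAIM (what is proved, stated in full; the proofs are below) =====
def Claim_equal_getascii : Prop := ∀ (s : String), Dom_getascii s → Spec_getascii s (getascii s)

-- ===== LEMMAS AND PROOFS =====

-- structural single-char split: (first group, remaining groups)
def pvSp : List Char → List Char × List (List Char)
  | [] => ([], [])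
  | c :: rest =>
    if c = ',' then ([], (pvSp rest).1 :: (pvSp rest).2)
    else (c :: (pvSp rest).1, (pvSp rest).2)

lemma pvGo_spec (fuel : Nat) (l cur : List Char) (acc : List (List Char))
    (h : l.length ≤ fuel) :
    PySem.Chars.splitOn.go [','] fuel l cur acc
      = acc.reverse ++ (cur.reverse ++ (pvSp l).1) :: (pvSp l).2 := by
  induction fuel generalizing l cur acc with
  | zero =>
    cases l with
    | nil => simp [PySem.Chars.splitOn.go, pvSp]
    | cons c rest => simp at h
  | succ fuel ih =>
    cases l with
    | nil => simp [PySem.Chars.splitOn.go, pvSp]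
    | cons c rest =>
      by_cases hc : c = ','
      · subst hc
        rw [show PySem.Chars.splitOn.go [','] (fuel+1) (',' :: rest) cur acc
            = PySem.Chars.splitOn.go [','] fuel rest [] (cur.reverse :: acc) by
          simp [PySem.Chars.splitOn.go, List.isPrefixOf]]
        rw [ih rest [] (cur.reverse :: acc) (by simpa using Nat.le_of_succ_le_succ h)]
        simp [pvSp]
      · rw [show PySem.Chars.splitOn.go [','] (fuel+1) (c :: rest) cur acc
            = PySem.Chars.splitOn.go [','] fuel rest (c :: cur) acc by
          simp [PySem.Chars.splitOn.go, List.isPrefixOf, Ne.symm hc]]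
        rw [ih rest (c :: cur) acc (by simpa using Nat.le_of_succ_le_succ h)]
        simp [pvSp, hc]

lemma pvSplitOn_eq (cs : List Char) :
    PySem.Chars.splitOn cs [','] = (pvSp cs).1 :: (pvSp cs).2 := by
  have := pvGo_spec (cs.length + 1) cs [] [] (by omega)
  simpa [PySem.Chars.splitOn] using this

-- A's loop body, named
def pvStep (retarr : List Int) (i : List Char) : List Int :=
  i.foldl (fun r c => r ++ [(c.toNat : Int)])
    (if retarr.length ≠ 0 then retarr ++ [44] else retarr)

lemma pvStep_eq (retarr : List Int) (i : List Char) :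
    pvStep retarr i
      = (if retarr.length ≠ 0 then retarr ++ [44] else retarr)
          ++ i.map (fun c => (c.toNat : Int)) := by
  rw [pvStep]; rw [PySem.List.foldl_append_singleton_eq_map]

lemma pvFold_nonempty (gs : List (List Char)) (r : List Int) (hr : r ≠ []) :
    gs.foldl pvStep r
      = r ++ (gs.flatMap (List.cons ',')).map (fun c => (c.toNat : Int)) := by
  induction gs generalizing r with
  | nil => simp
  | cons g gs ih =>
    rw [List.foldl_cons, pvStep_eq, if_pos (by simpa using hr),
        ih _ (by simp)]
    simp

lemma pvSp_glue (cs : List Char) :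
    (pvSp cs).1 ++ (pvSp cs).2.flatMap (List.cons ',') = cs := by
  induction cs with
  | nil => simp [pvSp]
  | cons c rest ih =>
    by_cases hc : c = ','
    · subst hc; simp [pvSp, ih]
    · simp [pvSp, hc, ih]

lemma pvFold_sp (cs : List Char) :
    ((pvSp cs).1 :: (pvSp cs).2).foldl pvStep []
      = (cs.dropWhile (fun c => c == ',')).map (fun c => (c.toNat : Int)) := by
  induction cs with
  | nil => simp [pvSp, pvStep]
  | cons c rest ih =>
    by_cases hc : c = ','
    · subst hc
      have h1 : pvStep [] ([] : List Char) = [] := by simp [pvStep]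
      simp only [pvSp, List.foldl_cons]
      simpa using ih
    · simp only [pvSp, if_neg hc, List.foldl_cons, pvStep_eq]
      rw [pvFold_nonempty _ _ (by simp)]
      have := pvSp_glue rest
      simp [hc, ← List.map_append, this]

-- ===== VERDICT (by name: the statement is the Claim_ definition above) =====
theorem getascii_spec : Claim_equal_getascii := by
  intro s _
  show getascii s = getascii_alt s
  unfold getascii getascii_alt
  rw [pvSplitOn_eq]
  rw [show (fun (retarr : List Int) (i : List Char) =>
      i.foldl (fun r c => r ++ [(c.toNat : Int)])
        (if retarr.length ≠ 0 then retarr ++ [44] else retarr)) = pvStep from rfl]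
  rw [pvFold_sp]
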